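-- pv_equiv track=rewrite | github.com/sgao1Babson/text-mining | part_2_code.py | most_common_both
-- ===== SOURCE A (Python) =====
-- def most_common_words(hist,range):
--     """
--     Makes a list of words freq pairs in descending order of frequency.
--     hist: map from word to frequency
--     returns: list of (frequency, word) pairs
--     """
--     a = sorted(hist.items(), key=lambda item:item[1],reverse=True)
--     a_words = []
--     for word, freq in a[0:range]:
--         a_words.append(word)
--     return a_words
--
-- def most_common_both(hist1,range1,hist2,range2):
--     """
--     Makes a list which returns the most frequent unique words from the two histograms in a given range of frequency.
--     """
--     a = most_common_words(hist1,range1)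
--     b = most_common_words(hist2,range2)
--
--     c_words = []
--     for i in a:
--         if i not in b:
--             c_words.append(i)
--     for y in b:
--         if y not in a:
--             c_words.append(y)
--     return c_words
-- ===== SOURCE B (Python) =====
-- def most_common_both(hist1, range1, hist2, range2):
--     def top(hist, k):
--         return [w for w, _ in sorted(hist.items(), key=lambda it: it[1], reverse=True)[:k]]
--     combined = top(hist1, range1) + top(hist2, range2)
--     counts = {}
--     for w in combined:
--         counts[w] = counts.get(w, 0) + 1
--     return [w for w in combined if counts[w] == 1]
-- ===== Notes on version B (the rewrite author's own statement) =====
-- stated objective: faster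
-- what changed: Replaces the two quadratic 'not in' membership scans with a single pass: concatenate the two top-k word lists, build one occurrence-count dict, and keep the words occurring exactly once (valid because each list has unique words).
import Mathlib
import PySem

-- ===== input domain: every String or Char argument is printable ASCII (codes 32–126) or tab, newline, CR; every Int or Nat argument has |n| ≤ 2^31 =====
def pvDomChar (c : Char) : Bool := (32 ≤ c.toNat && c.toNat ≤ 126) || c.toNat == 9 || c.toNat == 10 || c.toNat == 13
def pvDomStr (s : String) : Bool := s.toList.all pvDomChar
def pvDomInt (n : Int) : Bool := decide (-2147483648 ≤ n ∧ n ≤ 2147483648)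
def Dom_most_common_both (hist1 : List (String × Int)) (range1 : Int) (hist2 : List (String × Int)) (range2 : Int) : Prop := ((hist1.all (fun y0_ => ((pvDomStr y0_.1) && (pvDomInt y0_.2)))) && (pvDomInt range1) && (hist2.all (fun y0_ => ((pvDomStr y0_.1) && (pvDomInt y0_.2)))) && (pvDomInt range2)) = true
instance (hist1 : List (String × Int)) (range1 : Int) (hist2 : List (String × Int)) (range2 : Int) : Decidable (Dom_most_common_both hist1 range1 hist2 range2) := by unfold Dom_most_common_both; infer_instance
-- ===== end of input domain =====

-- B replaces A's two quadratic 'not in' scans with one occurrence-count dict over the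
-- concatenated top-k lists and a single filtered pass (objective: faster, constant-factor/asymptotic in k).

-- ===== PORT A =====
-- literal port of most_common_words: sort items by freq descending (stable), a[0:range], append words
def most_common_words (hist : List (String × Int)) (range : Int) : List String :=
  let a := PySem.List.sorted (PySem.Dict.ofList hist).items (fun item => item.2) true
  (PySem.List.slice a (some 0) (some range)).foldl (fun acc wf => acc ++ [wf.1]) []

def most_common_both (hist1 : List (String × Int)) (range1 : Int) (hist2 : List (String × Int)) (range2 : Int) : List String :=
  let a := most_common_words hist1 range1
  let b := most_common_words hist2 range2
  let c_words := a.foldl (fun acc i => if ¬ (i ∈ b) then acc ++ [i] else acc) []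
  let c_words := b.foldl (fun acc y => if ¬ (y ∈ a) then acc ++ [y] else acc) c_words
  c_words

-- ===== PORT B =====
-- top(hist, k): list comprehension over sorted(...)[:k]
def pvTop_alt (hist : List (String × Int)) (k : Int) : List String :=
  (PySem.List.slice
    (PySem.List.sorted (PySem.Dict.ofList hist).items (fun it => it.2) true)
    none (some k)).map (fun p => p.1)

def most_common_both_alt (hist1 : List (String × Int)) (range1 : Int) (hist2 : List (String × Int)) (range2 : Int) : List String :=
  let combined := pvTop_alt hist1 range1 ++ pvTop_alt hist2 range2
  let counts := combined.foldl (fun d w => d.insert w (d.getD w 0 + 1)) (PySem.Dict.empty : PySem.Dict String Int)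
  combined.filter (fun w => counts.getD w 0 == 1)

-- ===== PRECONDITION & SPEC =====
def Spec_most_common_both (hist1 : List (String × Int)) (range1 : Int) (hist2 : List (String × Int)) (range2 : Int) (out : List String) : Prop := out = most_common_both_alt hist1 range1 hist2 range2
instance (hist1 : List (String × Int)) (range1 : Int) (hist2 : List (String × Int)) (range2 : Int) (out : List String) : Decidable (Spec_most_common_both hist1 range1 hist2 range2 out) := by unfold Spec_most_common_both; infer_instance

-- ===== CLAIM (what is proved, stated in full; the proofs are below) =====
def Claim_equal_most_common_both : Prop := ∀ (hist1 : List (String × Int)) (range1 : Int) (hist2 : List (String × Int)) (range2 : Int), Dom_most_common_both hist1 range1 hist2 range2 → Spec_most_common_both hist1 range1 hist2 range2 (most_common_both hist1 range1 hist2 range2)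

-- ===== LEMMAS AND PROOFS =====

-- the append-singleton fold is map
theorem foldl_append_singleton {α β : Type} (l : List α) (f : α → β) (acc : List β) :
    l.foldl (fun acc x => acc ++ [f x]) acc = acc ++ l.map f := by
  induction l generalizing acc with
  | nil => simp
  | cons x xs ih => simp [List.foldl, ih]

-- slice with no start is a sublist (drop/take)
theorem slice_none_sublist {α : Type} (xs : List α) (b : Int) :
    (PySem.List.slice xs none (some b)).Sublist xs := by
  simp only [PySem.List.slice]
  exact ((xs.drop _).take_sublist _).trans (xs.drop_sublist _)

-- the selected word lists coincide and have no duplicates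
theorem top_eq (hist : List (String × Int)) (k : Int) :
    most_common_words hist k = pvTop_alt hist k := by
  simp only [most_common_words, pvTop_alt, foldl_append_singleton, List.nil_append,
    PySem.List.slice_zero_start]

theorem top_nodup (hist : List (String × Int)) (k : Int) :
    (pvTop_alt hist k).Nodup := by
  have hkeys : ((PySem.List.sorted (PySem.Dict.ofList hist).items (fun it => it.2) true).map
      (fun p : String × Int => p.1)).Nodup := by
    have hperm : (PySem.List.sorted (PySem.Dict.ofList hist).items (fun it => it.2) true).Perm
        (PySem.Dict.ofList hist).items := PySem.List.sorted_perm _ _ _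
    have := PySem.Dict.nodup_keys_ofList (κ := String) (ν := Int) hist
    simpa [PySem.Dict.keys] using ((hperm.map (fun p : String × Int => p.1)).nodup_iff).mpr this
  exact ((slice_none_sublist _ k).map _).nodup hkeys

-- count==1 over a++b splits into the two membership filters when a and b are duplicate-free
theorem filter_count_one {α : Type} [DecidableEq α] (a b : List α)
    (ha : a.Nodup) (hb : b.Nodup) :
    (a ++ b).filter (fun w => (a ++ b).count w == 1)
      = a.filter (fun i => decide (¬ i ∈ b)) ++ b.filter (fun y => decide (¬ y ∈ a)) := by
  rw [List.filter_append]
  congr 1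
  · apply List.filter_congr
    intro x hx
    have h1 : a.count x = 1 := List.count_eq_one_of_mem ha hx
    by_cases hxb : x ∈ b
    · have hpos : 0 < b.count x := List.count_pos_iff.mpr hxb
      simp [List.count_append, h1, hxb]
      omega
    · simp [List.count_append, h1, List.count_eq_zero_of_not_mem hxb, hxb]
  · apply List.filter_congr
    intro x hx
    have h1 : b.count x = 1 := List.count_eq_one_of_mem hb hx
    by_cases hxa : x ∈ a
    · have hpos : 0 < a.count x := List.count_pos_iff.mpr hxa
      simp [List.count_append, h1, hxa]
      omega
    · simp [List.count_append, h1, List.count_eq_zero_of_not_mem hxa, hxa]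

-- ===== VERDICT (by name: the statement is the Claim_ definition above) =====
theorem most_common_both_spec : Claim_equal_most_common_both := by
  intro hist1 range1 hist2 range2 _
  unfold Spec_most_common_both most_common_both most_common_both_alt
  dsimp only
  rw [top_eq, top_eq]
  set a := pvTop_alt hist1 range1 with ha
  set b := pvTop_alt hist2 range2 with hb
  clear_value a b
  rw [PySem.List.foldl_append_ite_eq_filter, PySem.List.foldl_append_ite_eq_filter]
  rw [PySem.Dict.foldl_insert_getD_add_one_eq_counter]
  have hpt : ∀ w, ((PySem.Dict.counter (a ++ b)).getD w 0 == (1 : Int))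
      = ((a ++ b).count w == 1) := by
    intro w
    rw [PySem.Dict.getD_counter]
    by_cases h : (a ++ b).count w = 1
    · simp [h]
    · have h' : ((a ++ b).count w : Int) ≠ 1 := by exact_mod_cast h
      simp
      omega
  simp only [hpt]
  rw [filter_count_one a b (ha ▸ top_nodup hist1 range1) (hb ▸ top_nodup hist2 range2)]
  simp
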